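-- pv_equiv track=rewrite | github.com/Discrete-Math-Dunwoody/Discrete-Math-Coding-Challenges | AndrewEgleCodingChallenges/SurjectionCalculator/oneWaySurjection.py | listGenerator
-- ===== SOURCE A (Python) =====
-- import math
--
-- def listGenerator(userList):
--     mapSet = userList[1]
--     firstSet = userList[0]
--
--     # For loop to create a list of powers for a surjection equation
--     # to multiply against its correct combination variable
--     powerList = []
--     for i in range(mapSet - 1, -1, -1):
--         powers = i ** firstSet
--         powerList.append(powers)
--
--     # For loop to create a list of combination for a surjection equation
--     # to multiply against its correct power variable
--     fact = math.factorial
--     combinationList = []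
--     for j in range(1, mapSet + 1):
--         combos = fact(mapSet) // (fact(j) * fact(mapSet - j))
--         combinationList.append(combos)
--
--     # For loop multiplying the variables in the powers list against
--     # the variables in the combinations list
--     multipliedList = []
--     for k in range(0, len(combinationList)):
--         multipliers = combinationList[k] * powerList[k]
--         multipliedList.append(multipliers)
--
--     return(multipliedList)
-- ===== SOURCE B (Python) =====
-- def listGenerator(userList):
--     firstSet = userList[0]
--     mapSet = userList[1]
--     # One pass: binomial via the incremental recurrence C(n,j) = C(n,j-1)*(n-j+1)//j,
--     # multiplied directly by the matching power (mapSet-j)**firstSet.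
--     result = []
--     c = 1
--     for j in range(1, mapSet + 1):
--         c = c * (mapSet - j + 1) // j
--         result.append(c * (mapSet - j) ** firstSet)
--     return result
-- ===== Notes on version B (the rewrite author's own statement) =====
-- stated objective: faster
-- what changed: Replaces the three separate passes (powers list, binomials via full factorials, then an index loop multiplying them) by a single pass computing each binomial incrementally with C(n,j)=C(n,j-1)*(n-j+1)//j and multiplying the power in place.
-- outside the precondition, e.g. on listGenerator([1]): A raises IndexError, B raises IndexError; on listGenerator([0]): A raises IndexError, B raises IndexError; on listGenerator([-1, 2]): A raises ZeroDivisionError, B raises ZeroDivisionError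
import Mathlib
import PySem

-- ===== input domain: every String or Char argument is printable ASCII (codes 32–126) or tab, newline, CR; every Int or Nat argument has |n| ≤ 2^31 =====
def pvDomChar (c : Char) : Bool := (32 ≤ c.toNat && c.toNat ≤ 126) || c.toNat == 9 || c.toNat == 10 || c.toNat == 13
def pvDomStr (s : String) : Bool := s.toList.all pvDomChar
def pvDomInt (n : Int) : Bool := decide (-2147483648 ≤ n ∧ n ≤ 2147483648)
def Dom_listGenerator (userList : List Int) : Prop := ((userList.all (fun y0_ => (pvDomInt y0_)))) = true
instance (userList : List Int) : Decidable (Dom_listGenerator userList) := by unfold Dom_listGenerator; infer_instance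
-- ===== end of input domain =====

-- B is a single pass using the incremental binomial recurrence instead of A's three
-- passes with full factorials per term (timed measurably faster on large inputs).

-- ===== PORT A =====
-- math.factorial; exact for n ≥ 0 (every call site under Pre_ has a nonnegative argument)
def pyFact (n : Int) : Int := (Nat.factorial n.toNat : Int)

def listGenerator (userList : List Int) : List Int :=
  let mapSet := PySem.List.pyGetD userList 1 0
  let firstSet := PySem.List.pyGetD userList 0 0
  -- i ** firstSet: exact for firstSet ≥ 0 (guaranteed by Pre_ whenever the loop runs)
  let powerList := (PySem.List.pyRange (mapSet - 1) (-1) (-1)).foldl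
    (fun acc i => acc ++ [i ^ firstSet.toNat]) []
  let combinationList := (PySem.List.pyRange 1 (mapSet + 1) 1).foldl
    (fun acc j => acc ++ [PySem.Int.floordiv (pyFact mapSet) (pyFact j * pyFact (mapSet - j))]) []
  let multipliedList := (PySem.List.pyRange 0 (combinationList.length : Int) 1).foldl
    (fun acc k => acc ++ [PySem.List.pyGetD combinationList k 0 * PySem.List.pyGetD powerList k 0]) []
  multipliedList

-- ===== PORT B =====
def listGenerator_alt (userList : List Int) : List Int :=
  let firstSet := PySem.List.pyGetD userList 0 0
  let mapSet := PySem.List.pyGetD userList 1 0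
  ((PySem.List.pyRange 1 (mapSet + 1) 1).foldl
    (fun (s : Int × List Int) j =>
      let c := PySem.Int.floordiv (s.1 * (mapSet - j + 1)) j
      (c, s.2 ++ [c * (mapSet - j) ^ firstSet.toNat]))
    ((1 : Int), ([] : List Int))).2

-- ===== PRECONDITION & SPEC =====
-- Pre_ excludes exactly the inputs where A raises: lists shorter than 2 (IndexError) and a
-- negative exponent userList[0] with userList[1] ≥ 1 (0 ** negative is a ZeroDivisionError;
-- for userList[1] ≤ 0 the power loop never runs, so a negative exponent is harmless there).
-- (The Lean ports happen to agree even outside Pre_, so the equality proof does not need it;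
-- Pre_ is stated because Python A raises on the excluded inputs.)
def Pre_listGenerator (userList : List Int) : Prop :=
  2 ≤ userList.length ∧ (0 ≤ PySem.List.pyGetD userList 0 0 ∨ PySem.List.pyGetD userList 1 0 ≤ 0)
instance (userList : List Int) : Decidable (Pre_listGenerator userList) := by
  unfold Pre_listGenerator; infer_instance
def pvWitness_listGenerator : List Int := [3, 5]
def Spec_listGenerator (userList : List Int) (out : List Int) : Prop := out = listGenerator_alt userList
instance (userList : List Int) (out : List Int) : Decidable (Spec_listGenerator userList out) := by unfold Spec_listGenerator; infer_instance

-- ===== CLAIM (what is proved, stated in full; the proofs are below) =====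
def Claim_equal_listGenerator : Prop := ∀ (userList : List Int), Dom_listGenerator userList → Pre_listGenerator userList → Spec_listGenerator userList (listGenerator userList)

-- ===== LEMMAS AND PROOFS =====

-- the incremental binomial step computes C(n, j) exactly
lemma binom_step (n j : Int) (h1 : 1 ≤ j) (h2 : j ≤ n) :
    PySem.Int.floordiv ((n.toNat.choose (j - 1).toNat : Int) * (n - j + 1)) j
      = (n.toNat.choose j.toNat : Int) := by
  have hk : j.toNat = (j - 1).toNat + 1 := by omega
  have hkn : (j - 1).toNat ≤ n.toNat := by omega
  have hcast : (n - j + 1) = ((n.toNat - (j - 1).toNat : ℕ) : Int) := by omega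
  rw [PySem.Int.floordiv_eq_ediv_of_pos (by omega), hcast]
  have hch : (n.toNat.choose (j - 1).toNat : Int) * ((n.toNat - (j - 1).toNat : ℕ) : Int)
      = (n.toNat.choose j.toNat : Int) * j := by
    rw [hk]
    have := Nat.choose_succ_right_eq n.toNat ((j - 1).toNat)
    have : (n.toNat.choose ((j-1).toNat + 1) * ((j-1).toNat + 1) : ℕ)
        = (n.toNat.choose (j-1).toNat * (n.toNat - (j-1).toNat) : ℕ) := this
    have hj : ((j - 1).toNat + 1 : Int) = j := by omega
    calc (n.toNat.choose (j-1).toNat : Int) * ((n.toNat - (j - 1).toNat : ℕ) : Int)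
        = ((n.toNat.choose (j-1).toNat * (n.toNat - (j-1).toNat) : ℕ) : Int) := by push_cast; ring
      _ = ((n.toNat.choose ((j-1).toNat + 1) * ((j-1).toNat + 1) : ℕ) : Int) := by rw [this]
      _ = (n.toNat.choose ((j-1).toNat + 1) : Int) * j := by push_cast [hj]; ring
  rw [hch, Int.mul_ediv_cancel _ (by omega)]

-- B's loop invariant
lemma alt_loop (n : Int) (M : Nat) :
    ∀ (j : Int) (acc : List Int), 1 ≤ j →
    ((PySem.List.pyRange j (n + 1) 1).foldl
      (fun (s : Int × List Int) i =>
        let c := PySem.Int.floordiv (s.1 * (n - i + 1)) i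
        (c, s.2 ++ [c * (n - i) ^ M]))
      ((n.toNat.choose (j - 1).toNat : Int), acc)).2
    = acc ++ (PySem.List.pyRange j (n + 1) 1).map
        (fun i => (n.toNat.choose i.toNat : Int) * (n - i) ^ M) := by
  intro j acc hj
  by_cases h : n + 1 ≤ j
  · rw [PySem.List.pyRange_one_eq_nil h]; simp
  · rw [PySem.List.pyRange_one_cons (by omega)]
    simp only [List.foldl_cons, List.map_cons]
    rw [binom_step n j hj (by omega)]
    have ih := alt_loop n M (j + 1) (acc ++ [(n.toNat.choose j.toNat : Int) * (n - j) ^ M]) (by omega)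
    have hjj : (j + 1 - 1).toNat = j.toNat := by omega
    rw [hjj] at ih
    rw [ih, List.append_assoc]
    simp
termination_by j _ => (n + 1 - j).toNat
decreasing_by omega

lemma comb_eq (n j : Int) (h1 : 1 ≤ j) (h2 : j ≤ n) :
    PySem.Int.floordiv (pyFact n) (pyFact j * pyFact (n - j))
      = (n.toNat.choose j.toNat : Int) := by
  unfold pyFact
  have hsub : (n - j).toNat = n.toNat - j.toNat := by omega
  have hpos : (0 : Int) < (j.toNat.factorial : Int) * ((n - j).toNat.factorial : Int) := by
    positivity
  rw [PySem.Int.floordiv_eq_ediv_of_pos hpos, hsub]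
  rw [show ((j.toNat.factorial : Int) * ((n.toNat - j.toNat).factorial : Int))
      = ((j.toNat.factorial * (n.toNat - j.toNat).factorial : ℕ) : Int) by push_cast; ring]
  rw [← Int.natCast_ediv]
  rw [Nat.choose_eq_factorial_div_factorial (by omega)]

lemma core (m n : Int) :
    ((PySem.List.pyRange 0 (((PySem.List.pyRange 1 (n + 1) 1).foldl
        (fun acc j => acc ++ [PySem.Int.floordiv (pyFact n) (pyFact j * pyFact (n - j))]) []).length : Int) 1).foldl
      (fun acc k => acc ++ [PySem.List.pyGetD ((PySem.List.pyRange 1 (n + 1) 1).foldl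
          (fun acc j => acc ++ [PySem.Int.floordiv (pyFact n) (pyFact j * pyFact (n - j))]) []) k 0 *
        PySem.List.pyGetD ((PySem.List.pyRange (n - 1) (-1) (-1)).foldl
          (fun acc i => acc ++ [i ^ m.toNat]) []) k 0]) [])
    = ((PySem.List.pyRange 1 (n + 1) 1).foldl
        (fun (s : Int × List Int) j =>
          let c := PySem.Int.floordiv (s.1 * (n - j + 1)) j
          (c, s.2 ++ [c * (n - j) ^ m.toNat]))
        ((1 : Int), ([] : List Int))).2 := by
  by_cases hpos : 0 < n
  case neg =>
    rw [PySem.List.pyRange_one_eq_nil (a := 1) (b := n + 1) (by omega)]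
    simp [PySem.List.pyRange]
  case pos =>
    lift n to ℕ using hpos.le with N
    have hB := alt_loop (N : Int) m.toNat 1 [] (by omega)
    norm_num at hB
    rw [hB]
    simp only [PySem.List.foldl_append_singleton_eq_map, List.nil_append]
    have hr2 : PySem.List.pyRange 1 ((N : Int) + 1) 1 = (List.range N).map (fun k : ℕ => 1 + (k : Int)) := by
      rw [PySem.List.pyRange_one]
      have : ((N : Int) + 1 - 1).toNat = N := by omega
      rw [this]
    have hr3 : PySem.List.pyRange ((N : Int) - 1) (-1) (-1)
        = (List.range N).map (fun k : ℕ => (N : Int) - 1 - (k : Int)) := by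
      rw [PySem.List.pyRange_neg_one]
      have : ((N : Int) - 1 - (-1)).toNat = N := by omega
      rw [this]
    have hlen : ((((List.range N).map (fun k : ℕ => 1 + (k : Int))).map
        (fun j => PySem.Int.floordiv (pyFact (N : Int)) (pyFact j * pyFact ((N : Int) - j)))).length : Int)
        = (N : Int) := by simp
    rw [hr2, hr3, hlen]
    have hr1 : PySem.List.pyRange 0 (N : Int) 1 = (List.range N).map (fun k : ℕ => (k : Int)) := by
      rw [PySem.List.pyRange_one]
      norm_num
    rw [hr1]
    simp only [List.map_map]
    apply List.map_congr_left
    intro k hk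
    have hkN : k < N := List.mem_range.mp hk
    simp only [Function.comp]
    have hgc : PySem.List.pyGetD ((List.range N).map
        ((fun j => PySem.Int.floordiv (pyFact (N : Int)) (pyFact j * pyFact ((N : Int) - j)))
          ∘ (fun k : ℕ => 1 + (k : Int)))) (k : Int) 0
        = PySem.Int.floordiv (pyFact (N : Int)) (pyFact (1 + k) * pyFact ((N : Int) - (1 + k))) := by
      rw [PySem.List.pyGetD_natCast]
      exact PySem.List.getD_map_range _ N k 0 hkN
    have hgp : PySem.List.pyGetD ((List.range N).map
        ((fun i => i ^ m.toNat) ∘ (fun k : ℕ => (N : Int) - 1 - (k : Int)))) (k : Int) 0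
        = ((N : Int) - 1 - k) ^ m.toNat := by
      rw [PySem.List.pyGetD_natCast]
      exact PySem.List.getD_map_range _ N k 0 hkN
    rw [hgc, hgp]
    rw [comb_eq (N : Int) (1 + k) (by omega) (by omega)]
    have h1 : ((1 : Int) + k).toNat = 1 + k := by omega
    have h2 : ((N : Int)).toNat = N := by omega
    rw [h1, h2]
    have h3 : ((N : Int) - (1 + (k : Int))) = ((N : Int) - 1 - k) := by ring
    rw [h3]

theorem main (userList : List Int) :
    listGenerator userList = listGenerator_alt userList := by
  unfold listGenerator listGenerator_alt
  exact core (PySem.List.pyGetD userList 0 0) (PySem.List.pyGetD userList 1 0)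

-- ===== VERDICT (by name: the statement is the Claim_ definition above) =====
theorem listGenerator_spec : Claim_equal_listGenerator := by
  intro userList _ _
  unfold Spec_listGenerator
  exact main userList
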